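-- pv_equiv track=rewrite | github.com/DM1TR1EN/tz | main_script.py | separate_enemies_by_rectangle
-- ===== SOURCE A (Python) =====
-- def separate_enemies_by_rectangle(player_x, player_y, enemies_coords,
--                                   attack_zone_width, attack_zone_height):
--     """
--     Разделяет список координат противников на 2 группы:
--       - in_zone: те, что попадают в прямоугольник (attack_zone_width x attack_zone_height),
--                  центрированный на (player_x, player_y).
--       - out_zone: те, что не попадают.
--
--     Также возвращает nearest_outside — ближайший из out_zone (или None, если его нет).
--
--     :return: (in_zone, out_zone, nearest_outside)
--     """
--     in_zone = []
--     out_zone = []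
--
--     left = player_x - attack_zone_width / 2
--     right = player_x + attack_zone_width / 2
--     top = player_y - attack_zone_height / 2
--     bottom = player_y + attack_zone_height / 2
--
--     for (ex, ey) in enemies_coords:
--         ix = int(ex)
--         iy = int(ey)
--         if left <= ix <= right and top <= iy <= bottom:
--             in_zone.append((ix, iy))
--         else:
--             out_zone.append((ix, iy))
--
--     nearest_outside = None
--     if out_zone:
--         nearest_outside = min(
--             out_zone,
--             key=lambda e: (e[0] - player_x) ** 2 + (e[1] - player_y) ** 2
--         )
--
--     return in_zone, out_zone, nearest_outside
-- ===== SOURCE B (Python) =====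
-- def separate_enemies_by_rectangle(player_x, player_y, enemies_coords,
--                                   attack_zone_width, attack_zone_height):
--     left = player_x - attack_zone_width / 2
--     right = player_x + attack_zone_width / 2
--     top = player_y - attack_zone_height / 2
--     bottom = player_y + attack_zone_height / 2
--
--     in_zone = []
--     out_zone = []
--     best = None
--     best_d = None
--
--     for (ex, ey) in enemies_coords:
--         ix = int(ex)
--         iy = int(ey)
--         if left <= ix <= right and top <= iy <= bottom:
--             in_zone.append((ix, iy))
--         else:
--             out_zone.append((ix, iy))
--             d = (ix - player_x) ** 2 + (iy - player_y) ** 2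
--             if best is None or d < best_d:
--                 best = (ix, iy)
--                 best_d = d
--
--     return in_zone, out_zone, best
-- ===== Notes on version B (the rewrite author's own statement) =====
-- stated objective: alternative
-- what changed: Fuses A's two passes (partition loop, then a second min-with-key scan over out_zone) into a single loop that maintains the running nearest-outside enemy and its cached squared distance, updating only on strictly smaller distance so ties keep the first element exactly as min does.
import Mathlib
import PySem

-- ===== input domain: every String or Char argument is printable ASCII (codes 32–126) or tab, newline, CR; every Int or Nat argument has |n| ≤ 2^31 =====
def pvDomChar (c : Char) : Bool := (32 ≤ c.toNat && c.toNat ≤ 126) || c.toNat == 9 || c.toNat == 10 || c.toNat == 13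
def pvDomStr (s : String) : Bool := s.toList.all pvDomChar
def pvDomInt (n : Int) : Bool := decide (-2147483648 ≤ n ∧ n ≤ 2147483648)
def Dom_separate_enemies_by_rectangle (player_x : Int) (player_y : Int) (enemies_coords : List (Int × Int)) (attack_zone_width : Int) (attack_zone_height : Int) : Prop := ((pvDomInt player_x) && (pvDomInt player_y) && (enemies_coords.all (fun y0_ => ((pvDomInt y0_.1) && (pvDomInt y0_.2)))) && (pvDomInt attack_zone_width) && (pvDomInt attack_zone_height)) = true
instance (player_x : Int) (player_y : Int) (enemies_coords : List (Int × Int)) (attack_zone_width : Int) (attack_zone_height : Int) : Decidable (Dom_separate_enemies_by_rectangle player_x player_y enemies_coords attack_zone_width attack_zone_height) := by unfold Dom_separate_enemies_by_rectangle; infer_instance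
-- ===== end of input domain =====

-- ===== PORT A =====
-- B fuses A's partition pass and its separate min-with-key scan into one loop with a
-- running strict-< nearest; same return value, proved equal (objective: alternative).
-- Shared bounds test: Python compares the int coordinate against player_x ± width/2 in
-- FLOAT arithmetic; on Dom (|ints| ≤ 2^31) those half-integer floats and comparisons are
-- exact, so 'left ≤ ix ≤ right' is ported exactly as the doubled-integer comparison.
def pvInRect (player_x player_y attack_zone_width attack_zone_height : Int) (e : Int × Int) : Bool :=
  decide (2 * player_x - attack_zone_width ≤ 2 * e.1) && decide (2 * e.1 ≤ 2 * player_x + attack_zone_width) &&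
  decide (2 * player_y - attack_zone_height ≤ 2 * e.2) && decide (2 * e.2 ≤ 2 * player_y + attack_zone_height)

-- loop body of A's for-loop (int(ex)/int(ey) are identity on Int inputs)
def pvStepA (player_x player_y attack_zone_width attack_zone_height : Int)
    (acc : List (Int × Int) × List (Int × Int)) (e : Int × Int) :
    List (Int × Int) × List (Int × Int) :=
  if pvInRect player_x player_y attack_zone_width attack_zone_height e then
    (acc.1 ++ [e], acc.2)
  else
    (acc.1, acc.2 ++ [e])

def separate_enemies_by_rectangle (player_x : Int) (player_y : Int) (enemies_coords : List (Int × Int)) (attack_zone_width : Int) (attack_zone_height : Int) : (List (Int × Int)) × (List (Int × Int)) × (Option (Int × Int)) :=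
  let p := enemies_coords.foldl (pvStepA player_x player_y attack_zone_width attack_zone_height) ([], [])
  let nearest_outside : Option (Int × Int) :=
    if p.2 = [] then none
    else PySem.List.min? p.2 (fun e => (e.1 - player_x) ^ 2 + (e.2 - player_y) ^ 2)
  (p.1, p.2, nearest_outside)

-- ===== PORT B =====
-- loop body of B's single fused loop; the best-so-far carries its cached squared distance
def pvStepB (player_x player_y attack_zone_width attack_zone_height : Int)
    (acc : List (Int × Int) × List (Int × Int) × Option ((Int × Int) × Int)) (e : Int × Int) :
    List (Int × Int) × List (Int × Int) × Option ((Int × Int) × Int) :=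
  if pvInRect player_x player_y attack_zone_width attack_zone_height e then
    (acc.1 ++ [e], acc.2.1, acc.2.2)
  else
    let d := (e.1 - player_x) ^ 2 + (e.2 - player_y) ^ 2
    let best :=
      match acc.2.2 with
      | none => some (e, d)
      | some (b, bd) => if d < bd then some (e, d) else some (b, bd)
    (acc.1, acc.2.1 ++ [e], best)

def separate_enemies_by_rectangle_alt (player_x : Int) (player_y : Int) (enemies_coords : List (Int × Int)) (attack_zone_width : Int) (attack_zone_height : Int) : (List (Int × Int)) × (List (Int × Int)) × (Option (Int × Int)) :=
  let r := enemies_coords.foldl (pvStepB player_x player_y attack_zone_width attack_zone_height) ([], [], none)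
  (r.1, r.2.1, r.2.2.map Prod.fst)

-- ===== PRECONDITION & SPEC =====
def Spec_separate_enemies_by_rectangle (player_x : Int) (player_y : Int) (enemies_coords : List (Int × Int)) (attack_zone_width : Int) (attack_zone_height : Int) (out : (List (Int × Int)) × (List (Int × Int)) × (Option (Int × Int))) : Prop := out = separate_enemies_by_rectangle_alt player_x player_y enemies_coords attack_zone_width attack_zone_height
instance (player_x : Int) (player_y : Int) (enemies_coords : List (Int × Int)) (attack_zone_width : Int) (attack_zone_height : Int) (out : (List (Int × Int)) × (List (Int × Int)) × (Option (Int × Int))) : Decidable (Spec_separate_enemies_by_rectangle player_x player_y enemies_coords attack_zone_width attack_zone_height out) := by unfold Spec_separate_enemies_by_rectangle; infer_instance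

-- ===== CLAIM =====
def Claim_equal_separate_enemies_by_rectangle : Prop := ∀ (player_x : Int) (player_y : Int) (enemies_coords : List (Int × Int)) (attack_zone_width : Int) (attack_zone_height : Int), Dom_separate_enemies_by_rectangle player_x player_y enemies_coords attack_zone_width attack_zone_height → Spec_separate_enemies_by_rectangle player_x player_y enemies_coords attack_zone_width attack_zone_height (separate_enemies_by_rectangle player_x player_y enemies_coords attack_zone_width attack_zone_height)

-- ===== LEMMAS AND PROOFS =====

-- the squared-distance key and the first-minimal fold step used by PySem.List.min?
def pvKey (player_x player_y : Int) (e : Int × Int) : Int :=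
  (e.1 - player_x) ^ 2 + (e.2 - player_y) ^ 2

def pvMinStep (player_x player_y : Int) (acc : Option (Int × Int)) (x : Int × Int) : Option (Int × Int) :=
  match acc with
  | none => some x
  | some m => if pvKey player_x player_y x < pvKey player_x player_y m then some x else some m

lemma foldA_snd (px py w h : Int) :
    ∀ (es : List (Int × Int)) (inz outz : List (Int × Int)),
      (es.foldl (pvStepA px py w h) (inz, outz)).2
        = outz ++ es.filter (fun e => !pvInRect px py w h e) := by
  intro es
  induction es with
  | nil => intro inz outz; simp
  | cons e es ih =>
    intro inz outz
    by_cases h1 : pvInRect px py w h e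
    · simp [List.foldl, pvStepA, h1, ih]
    · simp [List.foldl, pvStepA, h1, ih]

lemma foldB_eq (px py w h : Int) :
    ∀ (es : List (Int × Int)) (inz outz : List (Int × Int)) (bacc : Option (Int × Int)),
      es.foldl (pvStepB px py w h) (inz, outz, bacc.map (fun b => (b, pvKey px py b)))
        = ( (es.foldl (pvStepA px py w h) (inz, outz)).1,
            (es.foldl (pvStepA px py w h) (inz, outz)).2,
            ((es.filter (fun e => !pvInRect px py w h e)).foldl (pvMinStep px py) bacc).map
              (fun b => (b, pvKey px py b)) ) := by
  intro es
  induction es with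
  | nil => intro inz outz bacc; simp
  | cons e es ih =>
    intro inz outz bacc
    by_cases h1 : pvInRect px py w h e
    · simp [List.foldl, pvStepB, pvStepA, h1, ih]
    · have step : pvStepB px py w h (inz, outz, bacc.map (fun b => (b, pvKey px py b))) e
          = (inz, outz ++ [e], (pvMinStep px py bacc e).map (fun b => (b, pvKey px py b))) := by
        cases bacc with
        | none => simp [pvStepB, h1, pvMinStep, pvKey]
        | some b =>
          simp only [pvStepB, h1, pvMinStep, pvKey, Option.map, Bool.false_eq_true, if_false]
          split_ifs <;> simp_all
      simp only [List.foldl, step, List.filter, h1, ih, pvStepA, Bool.false_eq_true, if_false,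
        Bool.not_false]

lemma min?_eq_foldl (px py : Int) (xs : List (Int × Int)) :
    PySem.List.min? xs (pvKey px py) = xs.foldl (pvMinStep px py) none := by
  simp only [PySem.List.min?]
  apply List.foldl_ext
  intro acc x _
  cases acc <;> rfl

-- ===== VERDICT =====
theorem separate_enemies_by_rectangle_spec : Claim_equal_separate_enemies_by_rectangle := by
  intro px py es w h _hdom
  show _ = _
  unfold separate_enemies_by_rectangle separate_enemies_by_rectangle_alt
  have hb := foldB_eq px py w h es [] [] none
  simp only [Option.map_none] at hb
  simp only [hb, foldA_snd px py w h es [] [], List.nil_append]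
  have hk : (fun e : Int × Int => (e.1 - px) ^ 2 + (e.2 - py) ^ 2) = pvKey px py := rfl
  by_cases hout : es.filter (fun e => !pvInRect px py w h e) = []
  · simp [hout]
  · have hid : (Prod.fst ∘ fun b : Int × Int => (b, pvKey px py b)) = id := rfl
    simp [hout, Option.map_map, hk, min?_eq_foldl, hid]
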